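-- pv_equiv track=rewrite | github.com/Samstix636/duel-value-betting-bot | duel2.0/helper.py | get_sport_from_league
-- ===== SOURCE A (Python) =====
-- def get_sport_from_league(league: str) -> str | None:
--     league = league.strip().lower()
--
--     sport_map = {
--         "hockey": {
--             "nhl",
--             "ncaa-hockey",
--             "national-hockey-league",
--             "national-collegiate-athletic-association-hockey",
--         },
--         "basketball": {
--             "nba",
--             "ncaab",
--             "ncaab-w",
--             "wnba",
--             "ncaa-mens-basketball",
--             "ncaa-womens-basketball",
--             "womens-national-basketball-association",
--             "nba-summer",
--             "nba-preseason",
--             "euroleague",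
--             "national-basketball-association",
--         },
--         "baseball": {
--             "mlb",
--             "ncaa-baseball",
--             "major-league-baseball",
--             "national-collegiate-athletic-association-baseball",
--         },
--         "tennis": {
--             "grand-slams",
--             "atp",
--             "wta",
--             "association-of-tennis-professionals",
--             "womens-tennis-association",
--             "atp-wta-tours",
--             "challenger-tournaments",
--             "itf-events",
--         },
--         "football": {
--             "nfl",
--             "ncaa-football",
--             "cfl",
--             "nfl-preseason",
--             "national-collegiate-athletic-association-football",
--
--         },
--         "soccer": {
--             "mls",
--             "bundesliga",
--             "la-liga",
--             "ligue-1",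
--             "serie-a",
--             "epl", "pl", "spain-laliga", "laliga", "germany-bundesliga",
--             "efl championship", "english-football-league-championship",
--             "primeira-liga",
--             "major-league-soccer", "portugal-liga-portugal"
--             "england-premier-league", "champions-league",
--             "international-clubs-uefa-champions-league",
--         },
--     }
--
--     for sport, leagues in sport_map.items():
--         if league in leagues:
--             return sport
--
--     return None
-- ===== SOURCE B (Python) =====
-- # Flat lookup table: each league string maps directly to its sport (one dict.get, no loop).
-- # The league strings are copied verbatim from the source data (including the accidental
-- # concatenated "portugal-liga-portugalengland-premier-league" token).
-- _LEAGUE_TO_SPORT = {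
--     "nhl": "hockey",
--     "ncaa-hockey": "hockey",
--     "national-hockey-league": "hockey",
--     "national-collegiate-athletic-association-hockey": "hockey",
--     "nba": "basketball",
--     "ncaab": "basketball",
--     "ncaab-w": "basketball",
--     "wnba": "basketball",
--     "ncaa-mens-basketball": "basketball",
--     "ncaa-womens-basketball": "basketball",
--     "womens-national-basketball-association": "basketball",
--     "nba-summer": "basketball",
--     "nba-preseason": "basketball",
--     "euroleague": "basketball",
--     "national-basketball-association": "basketball",
--     "mlb": "baseball",
--     "ncaa-baseball": "baseball",
--     "major-league-baseball": "baseball",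
--     "national-collegiate-athletic-association-baseball": "baseball",
--     "grand-slams": "tennis",
--     "atp": "tennis",
--     "wta": "tennis",
--     "association-of-tennis-professionals": "tennis",
--     "womens-tennis-association": "tennis",
--     "atp-wta-tours": "tennis",
--     "challenger-tournaments": "tennis",
--     "itf-events": "tennis",
--     "nfl": "football",
--     "ncaa-football": "football",
--     "cfl": "football",
--     "nfl-preseason": "football",
--     "national-collegiate-athletic-association-football": "football",
--     "mls": "soccer",
--     "bundesliga": "soccer",
--     "la-liga": "soccer",
--     "ligue-1": "soccer",
--     "serie-a": "soccer",
--     "epl": "soccer",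
--     "pl": "soccer",
--     "spain-laliga": "soccer",
--     "laliga": "soccer",
--     "germany-bundesliga": "soccer",
--     "efl championship": "soccer",
--     "english-football-league-championship": "soccer",
--     "primeira-liga": "soccer",
--     "major-league-soccer": "soccer",
--     "portugal-liga-portugalengland-premier-league": "soccer",
--     "champions-league": "soccer",
--     "international-clubs-uefa-champions-league": "soccer",
-- }
--
--
-- def get_sport_from_league(league: str) -> str | None:
--     return _LEAGUE_TO_SPORT.get(league.strip().lower())
-- ===== Notes on version B (the rewrite author's own statement) =====
-- stated objective: simpler
-- what changed: Replaces the loop over the nested sport->set-of-leagues map with a single flat league->sport dictionary built once from the same literal data, so the lookup is one dict.get after normalization with no loop or per-set membership tests.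
import Mathlib
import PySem

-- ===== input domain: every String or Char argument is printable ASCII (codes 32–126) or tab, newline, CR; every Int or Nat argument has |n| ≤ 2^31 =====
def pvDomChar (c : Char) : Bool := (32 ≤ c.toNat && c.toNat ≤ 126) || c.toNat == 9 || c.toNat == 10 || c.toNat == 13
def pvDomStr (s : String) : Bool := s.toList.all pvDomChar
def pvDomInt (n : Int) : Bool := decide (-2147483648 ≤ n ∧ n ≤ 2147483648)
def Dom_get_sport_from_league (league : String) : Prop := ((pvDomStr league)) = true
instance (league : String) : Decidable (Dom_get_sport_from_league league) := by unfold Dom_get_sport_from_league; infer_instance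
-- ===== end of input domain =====

-- B replaces A's loop over sports with set-membership tests by a single flat league→sport
-- dictionary lookup (simpler: one get instead of an outer loop with per-set membership).

-- ===== PORT A =====
-- A's nested sport_map: insertion-ordered pairs (sport, set of leagues)
def pvSportMapA : List (String × PySem.Set String) :=
[
  ("hockey", PySem.Set.ofList ["nhl", "ncaa-hockey", "national-hockey-league", "national-collegiate-athletic-association-hockey"]),
  ("basketball", PySem.Set.ofList ["nba", "ncaab", "ncaab-w", "wnba", "ncaa-mens-basketball", "ncaa-womens-basketball", "womens-national-basketball-association", "nba-summer", "nba-preseason", "euroleague", "national-basketball-association"]),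
  ("baseball", PySem.Set.ofList ["mlb", "ncaa-baseball", "major-league-baseball", "national-collegiate-athletic-association-baseball"]),
  ("tennis", PySem.Set.ofList ["grand-slams", "atp", "wta", "association-of-tennis-professionals", "womens-tennis-association", "atp-wta-tours", "challenger-tournaments", "itf-events"]),
  ("football", PySem.Set.ofList ["nfl", "ncaa-football", "cfl", "nfl-preseason", "national-collegiate-athletic-association-football"]),
  ("soccer", PySem.Set.ofList ["mls", "bundesliga", "la-liga", "ligue-1", "serie-a", "epl", "pl", "spain-laliga", "laliga", "germany-bundesliga", "efl championship", "english-football-league-championship", "primeira-liga", "major-league-soccer", "portugal-liga-portugalengland-premier-league", "champions-league", "international-clubs-uefa-champions-league"])]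

-- the 'for sport, leagues in sport_map.items(): if league in leagues: return sport' loop
def pvLoopA : List (String × PySem.Set String) → String → Option String
  | [], _ => none
  | (sport, leagues) :: rest, lg =>
      if PySem.Set.contains leagues lg then some sport else pvLoopA rest lg

def get_sport_from_league (league : String) : Option String :=
  pvLoopA pvSportMapA (PySem.Str.lower (PySem.Str.strip league))

-- ===== PORT B =====
-- B's flat dict literal _LEAGUE_TO_SPORT
def pvLeagueToSport : PySem.Dict String String := PySem.Dict.mk
[
  ("nhl", "hockey"),
  ("ncaa-hockey", "hockey"),
  ("national-hockey-league", "hockey"),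
  ("national-collegiate-athletic-association-hockey", "hockey"),
  ("nba", "basketball"),
  ("ncaab", "basketball"),
  ("ncaab-w", "basketball"),
  ("wnba", "basketball"),
  ("ncaa-mens-basketball", "basketball"),
  ("ncaa-womens-basketball", "basketball"),
  ("womens-national-basketball-association", "basketball"),
  ("nba-summer", "basketball"),
  ("nba-preseason", "basketball"),
  ("euroleague", "basketball"),
  ("national-basketball-association", "basketball"),
  ("mlb", "baseball"),
  ("ncaa-baseball", "baseball"),
  ("major-league-baseball", "baseball"),
  ("national-collegiate-athletic-association-baseball", "baseball"),
  ("grand-slams", "tennis"),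
  ("atp", "tennis"),
  ("wta", "tennis"),
  ("association-of-tennis-professionals", "tennis"),
  ("womens-tennis-association", "tennis"),
  ("atp-wta-tours", "tennis"),
  ("challenger-tournaments", "tennis"),
  ("itf-events", "tennis"),
  ("nfl", "football"),
  ("ncaa-football", "football"),
  ("cfl", "football"),
  ("nfl-preseason", "football"),
  ("national-collegiate-athletic-association-football", "football"),
  ("mls", "soccer"),
  ("bundesliga", "soccer"),
  ("la-liga", "soccer"),
  ("ligue-1", "soccer"),
  ("serie-a", "soccer"),
  ("epl", "soccer"),
  ("pl", "soccer"),
  ("spain-laliga", "soccer"),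
  ("laliga", "soccer"),
  ("germany-bundesliga", "soccer"),
  ("efl championship", "soccer"),
  ("english-football-league-championship", "soccer"),
  ("primeira-liga", "soccer"),
  ("major-league-soccer", "soccer"),
  ("portugal-liga-portugalengland-premier-league", "soccer"),
  ("champions-league", "soccer"),
  ("international-clubs-uefa-champions-league", "soccer")]

def get_sport_from_league_alt (league : String) : Option String :=
  pvLeagueToSport.get? (PySem.Str.lower (PySem.Str.strip league))

-- ===== PRECONDITION & SPEC =====
def Spec_get_sport_from_league (league : String) (out : Option String) : Prop := out = get_sport_from_league_alt league
instance (league : String) (out : Option String) : Decidable (Spec_get_sport_from_league league out) := by unfold Spec_get_sport_from_league; infer_instance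

-- ===== CLAIM (what is proved, stated in full; the proofs are below) =====
def Claim_equal_get_sport_from_league : Prop := ∀ (league : String), Dom_get_sport_from_league league → Spec_get_sport_from_league league (get_sport_from_league league)

-- ===== LEMMAS AND PROOFS =====

-- A's first-match loop over (sport, leagues) pairs equals first-match lookup in the
-- flattened association list (one (league, sport) pair per league, in order).
theorem pvLoopA_eq_flat_lookup (t : String) :
    ∀ (table : List (String × PySem.Set String)),
      pvLoopA table t
        = (PySem.Dict.mk (table.flatMap fun p => p.2.map (fun l => (l, p.1)))).get? t := by
  intro table
  induction table with
  | nil => rfl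
  | cons p rest ih =>
      obtain ⟨sp, ls⟩ := p
      simp only [pvLoopA, List.flatMap_cons]
      induction ls with
      | nil =>
          simpa [PySem.Set.contains] using ih
      | cons l ls ihl =>
          by_cases h : l = t
          · subst h
            simp [PySem.Dict.get?_mk_cons]
          · have hb : (l == t) = false := by simp [h]
            have ht : ¬ t = l := fun e => h e.symm
            simp only [List.map_cons, List.cons_append, PySem.Dict.get?_mk_cons, hb,
              if_false, Bool.false_eq_true]
            simpa [PySem.Set.contains, ht] using ihl

-- B's literal flat dict is exactly the flattening of A's nested map.
theorem pvFlatten_eq :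
    (pvSportMapA.flatMap fun p => p.2.map (fun l => (l, p.1))) = pvLeagueToSport.items := by
  decide

-- ===== VERDICT (by name: the statement is the Claim_ definition above) =====
theorem get_sport_from_league_spec : Claim_equal_get_sport_from_league := by
  intro league _
  unfold Spec_get_sport_from_league get_sport_from_league get_sport_from_league_alt
  rw [pvLoopA_eq_flat_lookup, pvFlatten_eq]
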